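-- pv_equiv track=rewrite | github.com/yussef-elm/agency-dash | api_client.py | merge_appointments_by_day
-- ===== SOURCE A (Python) =====
-- def get_date_from_iso(iso_string):
--     return iso_string.split('T')[0] if iso_string else 'unknown'
--
-- def merge_appointments_by_day(appointments):
--     appointments_by_day = {}
--     for appointment in appointments:
--         date = get_date_from_iso(appointment.get('startTime'))
--         status = appointment.get('appointmentStatus') or appointment.get('status') or 'unknown'
--         status = status.lower()
--
--         if date not in appointments_by_day:
--             appointments_by_day[date] = {'total': 0}
--         appointments_by_day[date]['total'] += 1
--         appointments_by_day[date][status] = appointments_by_day[date].get(status, 0) + 1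
--     return appointments_by_day
-- ===== SOURCE B (Python) =====
-- from collections import defaultdict
--
--
-- def get_date_from_iso(iso_string):
--     return iso_string.split('T')[0] if iso_string else 'unknown'
--
--
-- def merge_appointments_by_day(appointments):
--     # pass 1: group lowercased statuses by day
--     statuses_by_day = defaultdict(list)
--     for appointment in appointments:
--         date = get_date_from_iso(appointment.get('startTime'))
--         status = appointment.get('appointmentStatus') or appointment.get('status') or 'unknown'
--         statuses_by_day[date].append(status.lower())
--     # pass 2: count each day's statuses
--     result = {}
--     for date, statuses in statuses_by_day.items():
--         counts = {'total': 0}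
--         for status in statuses:
--             counts['total'] += 1
--             counts[status] = counts.get(status, 0) + 1
--         result[date] = counts
--     return result
-- ===== Notes on version B (the rewrite author's own statement) =====
-- stated objective: alternative
-- what changed: B replaces A's single interleaved loop that mutates a nested counts dict per appointment with a two-pass group-then-count decomposition: one pass groups lowercased statuses per day into a defaultdict(list), a second pass builds each day's counts dict from its status list.
import Mathlib
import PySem

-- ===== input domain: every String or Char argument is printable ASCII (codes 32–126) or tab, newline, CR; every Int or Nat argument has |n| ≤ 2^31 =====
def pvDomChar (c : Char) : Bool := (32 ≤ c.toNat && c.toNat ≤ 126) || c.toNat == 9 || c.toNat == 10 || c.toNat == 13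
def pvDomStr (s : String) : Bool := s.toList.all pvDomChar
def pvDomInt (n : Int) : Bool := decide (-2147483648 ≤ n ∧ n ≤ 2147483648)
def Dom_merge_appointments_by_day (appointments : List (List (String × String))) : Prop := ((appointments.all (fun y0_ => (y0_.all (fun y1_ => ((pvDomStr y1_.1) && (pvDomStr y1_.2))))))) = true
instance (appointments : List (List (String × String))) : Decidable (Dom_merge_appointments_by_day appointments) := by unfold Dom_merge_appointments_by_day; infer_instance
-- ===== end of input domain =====

-- B re-implements A's single interleaved counting loop as a two-pass group-then-count
-- decomposition (group statuses per day, then count each day's list); same O(n) cost.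


-- ===== PORT A =====
-- helper shared by both Pythons: `iso_string.split('T')[0] if iso_string else 'unknown'`
-- (the separator "T" is nonempty so split? is some, and the split is nonempty, so [0] is its head)
def get_date_from_iso (iso_string : Option String) : String :=
  match iso_string with
  | some s => if s ≠ "" then ((PySem.Str.split? s "T").getD []).headD "" else "unknown"
  | none => "unknown"

-- Python `x or y` on an optional string: y when x is None or ""
def pyOrStr (x : Option String) (y : String) : String :=
  match x with
  | some s => if s ≠ "" then s else y
  | none => y

def merge_appointments_by_day (appointments : List (List (String × String))) : List (String × List (String × Int)) :=
  let final : PySem.Dict String (PySem.Dict String Int) :=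
    appointments.foldl (fun acc appointment =>
      let a : PySem.Dict String String := PySem.Dict.mk appointment
      let date := get_date_from_iso (a.get? "startTime")
      let status := PySem.Str.lower
        (pyOrStr (a.get? "appointmentStatus") (pyOrStr (a.get? "status") "unknown"))
      let acc := if acc.contains date = false
                 then acc.insert date (PySem.Dict.mk [("total", (0 : Int))])
                 else acc
      -- the two in-place updates of the inner dict, then written back
      let inner := acc.getD date (PySem.Dict.mk [])
      let inner := inner.insert "total" (inner.getD "total" 0 + 1)
      let inner := inner.insert status (inner.getD status 0 + 1)
      acc.insert date inner) PySem.Dict.empty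
  final.items.map (fun p => (p.1, p.2.items))

-- ===== PORT B =====
def merge_appointments_by_day_alt (appointments : List (List (String × String))) : List (String × List (String × Int)) :=
  -- pass 1: group lowercased statuses by day (defaultdict(list) append)
  let statuses_by_day : PySem.Dict String (List String) :=
    appointments.foldl (fun g appointment =>
      let a : PySem.Dict String String := PySem.Dict.mk appointment
      let date := get_date_from_iso (a.get? "startTime")
      let status := pyOrStr (a.get? "appointmentStatus") (pyOrStr (a.get? "status") "unknown")
      g.insert date (g.getD date [] ++ [PySem.Str.lower status])) PySem.Dict.empty
  -- pass 2: count each day's statuses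
  statuses_by_day.items.map (fun p =>
    (p.1, (p.2.foldl (fun counts status =>
            let counts := counts.insert "total" (counts.getD "total" 0 + 1)
            counts.insert status (counts.getD status 0 + 1))
          (PySem.Dict.mk [("total", (0 : Int))])).items))

-- ===== PRECONDITION & SPEC =====
def Spec_merge_appointments_by_day (appointments : List (List (String × String))) (out : List (String × List (String × Int))) : Prop := out = merge_appointments_by_day_alt appointments
instance (appointments : List (List (String × String))) (out : List (String × List (String × Int))) : Decidable (Spec_merge_appointments_by_day appointments out) := by unfold Spec_merge_appointments_by_day; infer_instance

-- ===== CLAIM (what is proved, stated in full; the proofs are below) =====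
def Claim_equal_merge_appointments_by_day : Prop := ∀ (appointments : List (List (String × String))), Dom_merge_appointments_by_day appointments → Spec_merge_appointments_by_day appointments (merge_appointments_by_day appointments)

-- ===== LEMMAS AND PROOFS =====

-- (date, lowercased status) of one appointment — both ports compute exactly this pair
def pvKey (appointment : List (String × String)) : String × String :=
  let a : PySem.Dict String String := PySem.Dict.mk appointment
  (get_date_from_iso (a.get? "startTime"),
   PySem.Str.lower (pyOrStr (a.get? "appointmentStatus") (pyOrStr (a.get? "status") "unknown")))

-- the inner counting step and the count of a whole status list
def pvCnt (counts : PySem.Dict String Int) (status : String) : PySem.Dict String Int :=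
  let counts := counts.insert "total" (counts.getD "total" 0 + 1)
  counts.insert status (counts.getD status 0 + 1)

def pvCount (sts : List String) : PySem.Dict String Int :=
  sts.foldl pvCnt (PySem.Dict.mk [("total", (0 : Int))])

-- A's loop body and B's grouping body, in terms of pvKey
def pvStepA (acc : PySem.Dict String (PySem.Dict String Int)) (appointment : List (String × String)) : PySem.Dict String (PySem.Dict String Int) :=
  let k := pvKey appointment
  let acc := if acc.contains k.1 = false
             then acc.insert k.1 (PySem.Dict.mk [("total", (0 : Int))])
             else acc
  let inner := acc.getD k.1 (PySem.Dict.mk [])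
  acc.insert k.1 (pvCnt inner k.2)

def pvStepB (g : PySem.Dict String (List String)) (appointment : List (String × String)) : PySem.Dict String (List String) :=
  let k := pvKey appointment
  g.insert k.1 (g.getD k.1 [] ++ [k.2])

-- map pvCount over a grouping dict's values
def pvMapC (g : PySem.Dict String (List String)) : PySem.Dict String (PySem.Dict String Int) :=
  PySem.Dict.mk (g.items.map (fun p => (p.1, pvCount p.2)))

theorem pvKeys_mapC (g : PySem.Dict String (List String)) : (pvMapC g).keys = g.keys := by
  simp [pvMapC, PySem.Dict.keys]

theorem pvContains_mapC (g : PySem.Dict String (List String)) (k : String) :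
    (pvMapC g).contains k = g.contains k := by
  rw [PySem.Dict.contains_eq_decide_mem_keys, PySem.Dict.contains_eq_decide_mem_keys, pvKeys_mapC]

theorem pvStep_comm' (g : PySem.Dict String (List String)) (hnd : g.keys.Nodup) (d s : String) :
    (let acc := if (pvMapC g).contains d = false
                then (pvMapC g).insert d (PySem.Dict.mk [("total", (0 : Int))])
                else pvMapC g
     acc.insert d (pvCnt (acc.getD d (PySem.Dict.mk [])) s))
      = pvMapC (g.insert d (g.getD d [] ++ [s])) := by
  by_cases h : g.contains d = true
  · -- the day is already present: pure overwrite on both sides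
    have hs1 : (g.get? d).isSome = true := by
      rw [← PySem.Dict.contains_eq_isSome_get?]; exact h
    obtain ⟨sts, hget⟩ := Option.isSome_iff_exists.mp hs1
    have hmem : (d, sts) ∈ g.items := PySem.Dict.mem_items_of_get?_eq_some g hget
    have hgD : g.getD d [] = sts := PySem.Dict.getD_of_mem_items g hmem hnd []
    have hmemC : (d, pvCount sts) ∈ (pvMapC g).items := by
      simp only [pvMapC]
      exact List.mem_map.mpr ⟨(d, sts), hmem, rfl⟩
    have hndC : (pvMapC g).keys.Nodup := by rw [pvKeys_mapC]; exact hnd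
    have hgDC : (pvMapC g).getD d (PySem.Dict.mk []) = pvCount sts :=
      PySem.Dict.getD_of_mem_items (pvMapC g) hmemC hndC (PySem.Dict.mk [])
    have h2 : ¬ ((pvMapC g).contains d = false) := by rw [pvContains_mapC, h]; simp
    show (if (pvMapC g).contains d = false then _ else pvMapC g).insert d _ = _
    rw [if_neg h2, hgDC, hgD]
    apply PySem.Dict.ext
    rw [PySem.Dict.items_insert_of_contains (pvMapC g) (pvCnt (pvCount sts) s)
        (by rw [pvContains_mapC]; exact h)]
    simp only [pvMapC, PySem.Dict.items_insert_of_contains g (sts ++ [s]) h, List.map_map]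
    apply List.map_congr_left
    intro p _
    by_cases hp : p.1 == d
    · have hcnt : pvCount (sts ++ [s]) = pvCnt (pvCount sts) s := by
        simp [pvCount, List.foldl_append]
      simp [Function.comp, hp, hcnt]
    · simp [Function.comp, hp]
  · -- a new day: both sides append at the end
    have h' : g.contains d = false := by simpa using h
    have hC' : (pvMapC g).contains d = false := by rw [pvContains_mapC]; exact h'
    have hgD : g.getD d [] = [] := PySem.Dict.getD_of_not_contains g [] h'
    show (if (pvMapC g).contains d = false then _ else pvMapC g).insert d _ = _
    rw [if_pos hC', hgD, PySem.Dict.getD_insert_self, PySem.Dict.insert_insert_self]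
    apply PySem.Dict.ext
    rw [PySem.Dict.items_insert_of_not_contains (pvMapC g)
        (pvCnt (PySem.Dict.mk [("total", (0 : Int))]) s) hC']
    simp only [pvMapC, List.nil_append, PySem.Dict.items_insert_of_not_contains g [s] h',
      List.map_append]
    rfl

theorem pvStep_comm (g : PySem.Dict String (List String)) (hnd : g.keys.Nodup) (x : List (String × String)) :
    pvStepA (pvMapC g) x = pvMapC (pvStepB g x) :=
  pvStep_comm' g hnd (pvKey x).1 (pvKey x).2

theorem pvMain (l : List (List (String × String))) (g : PySem.Dict String (List String)) (hnd : g.keys.Nodup) :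
    l.foldl pvStepA (pvMapC g) = pvMapC (l.foldl pvStepB g) := by
  induction l generalizing g with
  | nil => rfl
  | cons x xs ih =>
      simp only [List.foldl_cons, pvStep_comm g hnd x]
      exact ih _ (by
        simp only [pvStepB]
        exact PySem.Dict.nodup_keys_insert _ _ _ hnd)

-- ===== VERDICT (by name: the statement is the Claim_ definition above) =====
theorem merge_appointments_by_day_spec : Claim_equal_merge_appointments_by_day := by
  intro appointments _
  show _ = _
  have hA : merge_appointments_by_day appointments
      = (appointments.foldl pvStepA PySem.Dict.empty).items.map (fun p => (p.1, p.2.items)) := by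
    unfold merge_appointments_by_day
    congr 1
  have hB : merge_appointments_by_day_alt appointments
      = (pvMapC (appointments.foldl pvStepB PySem.Dict.empty)).items.map (fun p => (p.1, p.2.items)) := by
    unfold merge_appointments_by_day_alt pvMapC
    simp only [List.map_map]
    rfl
  rw [hA, hB]
  have : (PySem.Dict.empty : PySem.Dict String (PySem.Dict String Int)) = pvMapC PySem.Dict.empty := rfl
  rw [this, pvMain _ _ PySem.Dict.nodup_keys_empty]
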